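-- pv_equiv track=rewrite | github.com/niranjana-2004/coding_practice | perfect.py | perfectArr
-- ===== SOURCE A (Python) =====
-- def perfectArr(arr,n):
--     i=1
--     while(i<n and arr[i]>arr[i-1]):
--         i+=1
--     while(i<n and arr[i]==arr[i-1]):
--         i+=1
--     while(i<n and arr[i]<arr[i-1]):
--         i+=1
--     return(i==n)
-- ===== SOURCE B (Python) =====
-- def perfectArr(arr, n):
--     prev = 1
--     i = 1
--     while i < n:
--         s = (arr[i] > arr[i - 1]) - (arr[i] < arr[i - 1])
--         if s > prev:
--             return False
--         prev = s
--         i += 1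
--     return i == n
-- ===== Notes on version B (the rewrite author's own statement) =====
-- stated objective: simpler
-- what changed: A's three consecutive phase-loops (strictly increasing, then equal, then decreasing) are replaced by a single pass that computes the sign of each adjacent difference and fails as soon as a sign exceeds the previous one.
import Mathlib
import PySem

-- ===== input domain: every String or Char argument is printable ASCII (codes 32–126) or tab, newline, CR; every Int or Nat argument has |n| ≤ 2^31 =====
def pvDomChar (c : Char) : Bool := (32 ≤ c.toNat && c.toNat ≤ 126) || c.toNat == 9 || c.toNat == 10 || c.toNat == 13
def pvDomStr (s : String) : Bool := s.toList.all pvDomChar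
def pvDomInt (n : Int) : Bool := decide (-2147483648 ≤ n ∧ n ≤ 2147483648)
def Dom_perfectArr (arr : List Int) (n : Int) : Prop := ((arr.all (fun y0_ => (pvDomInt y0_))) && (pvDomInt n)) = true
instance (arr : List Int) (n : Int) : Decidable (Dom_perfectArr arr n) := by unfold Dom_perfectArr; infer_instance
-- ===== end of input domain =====

-- B replaces A's three phase-loops (increasing, equal, decreasing) by one scan that
-- checks the sign of each adjacent difference never increases: simpler, same O(n) cost.

-- ===== PORT A =====
-- one while loop of A: advance i while i<n and cmp arr[i] arr[i-1]; on an
-- out-of-range access Python raises (excluded by Pre_), the port stops at i.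
def aLoop (cmp : Int → Int → Bool) (arr : List Int) (n i : Int) : Nat → Int
  | 0 => i
  | fuel+1 =>
    if i < n then
      match PySem.List.pyGet? arr i, PySem.List.pyGet? arr (i-1) with
      | some x, some y => if cmp x y then aLoop cmp arr n (i+1) fuel else i
      | _, _ => i
    else i

def perfectArr (arr : List Int) (n : Int) : Bool :=
  let i1 := aLoop (fun x y => x > y) arr n 1 (n-1).toNat
  let i2 := aLoop (fun x y => x == y) arr n i1 (n-i1).toNat
  let i3 := aLoop (fun x y => x < y) arr n i2 (n-i2).toNat
  i3 == n

-- ===== PORT B =====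
-- while i < n: s = sign(arr[i]-arr[i-1]); return False if s > prev; else prev := s.
-- On an out-of-range access Python raises (excluded by Pre_), the port returns false.
def bLoop (arr : List Int) (n i prev : Int) : Nat → Bool
  | 0 => i == n
  | fuel+1 =>
    if i < n then
      match PySem.List.pyGet? arr i, PySem.List.pyGet? arr (i-1) with
      | some x, some y =>
        let s : Int := (if x > y then 1 else 0) - (if x < y then 1 else 0)
        if s > prev then false else bLoop arr n (i+1) s fuel
      | _, _ => false
    else i == n

def perfectArr_alt (arr : List Int) (n : Int) : Bool :=
  bLoop arr n 1 1 (n-1).toNat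

-- ===== PRECONDITION & SPEC =====
-- Pre_ excludes exactly the inputs where Python A raises IndexError (B raises at the
-- same point): n > len(arr), n ≥ 2, and the signs of adjacent differences are
-- non-increasing throughout arr, so the scan runs past the end of the list.
def Pre_perfectArr (arr : List Int) (n : Int) : Prop :=
  n ≤ 1 ∨ n ≤ arr.length ∨
  ¬ (let sgns := List.zipWith
        (fun x y => ((if x > y then (1:Int) else 0) - (if x < y then 1 else 0))) arr.tail arr
     (sgns.zip sgns.tail).all (fun p => p.2 ≤ p.1) = true)
instance (arr : List Int) (n : Int) : Decidable (Pre_perfectArr arr n) := by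
  unfold Pre_perfectArr; infer_instance
def pvWitness_perfectArr : List Int × Int := ([1, 3, 3, 2], 4)

def Spec_perfectArr (arr : List Int) (n : Int) (out : Bool) : Prop := out = perfectArr_alt arr n
instance (arr : List Int) (n : Int) (out : Bool) : Decidable (Spec_perfectArr arr n out) := by
  unfold Spec_perfectArr; infer_instance

-- ===== CLAIM (what is proved, stated in full; the proofs are below) =====
def Claim_equal_perfectArr : Prop := ∀ (arr : List Int) (n : Int), Dom_perfectArr arr n → Pre_perfectArr arr n → Spec_perfectArr arr n (perfectArr arr n)

-- ===== LEMMAS AND PROOFS =====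

lemma int_beq_decide (a b : Int) : (a == b) = decide (a = b) := by
  by_cases h : a = b <;> simp [h]

lemma aLoop_stop (cmp : Int → Int → Bool) (arr : List Int) (n i : Int) (fuel : Nat)
    (h : n ≤ i) : aLoop cmp arr n i fuel = i := by
  cases fuel with
  | zero => rfl
  | succ f => simp [aLoop, not_lt.mpr h]

lemma aLoop_ge (cmp : Int → Int → Bool) (arr : List Int) (n : Int) :
    ∀ (fuel : Nat) (i : Int), i ≤ aLoop cmp arr n i fuel := by
  intro fuel
  induction fuel with
  | zero => intro i; simp [aLoop]
  | succ f ih =>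
    intro i
    simp only [aLoop]
    split
    · cases hx : PySem.List.pyGet? arr i with
      | none => simp
      | some x =>
        cases hy : PySem.List.pyGet? arr (i-1) with
        | none => simp
        | some y =>
          simp only []
          split
          · exact le_trans (by omega) (ih (i+1))
          · exact le_refl i
    · exact le_refl i

lemma aLoop_fuel (cmp : Int → Int → Bool) (arr : List Int) (n : Int) :
    ∀ (f g : Nat) (i : Int), (n - i).toNat ≤ f → (n - i).toNat ≤ g →
      aLoop cmp arr n i f = aLoop cmp arr n i g := by
  intro f
  induction f with
  | zero =>
    intro g i hf hg
    have hni : n ≤ i := by omega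
    rw [aLoop_stop _ _ _ _ _ hni, aLoop_stop _ _ _ _ _ hni]
  | succ f ih =>
    intro g i hf hg
    by_cases hin : i < n
    · obtain ⟨g', rfl⟩ : ∃ g', g = g' + 1 := ⟨g - 1, by omega⟩
      simp only [aLoop, if_pos hin]
      cases hx : PySem.List.pyGet? arr i with
      | none => rfl
      | some x =>
        cases hy : PySem.List.pyGet? arr (i-1) with
        | none => rfl
        | some y =>
          simp only []
          split
          · exact ih g' (i+1) (by omega) (by omega)
          · rfl
    · rw [aLoop_stop _ _ _ _ _ (by omega), aLoop_stop _ _ _ _ _ (by omega)]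

-- the heart of the proof: one bLoop pass in phase `prev` equals the remaining
-- phase-loops of A, all run with a common fuel.
lemma bLoop_phases (arr : List Int) (n : Int) :
    ∀ (fuel : Nat) (i : Int), (n - i).toNat ≤ fuel →
      (bLoop arr n i (-1) fuel
        = decide (aLoop (fun x y => x < y) arr n i fuel = n)) ∧
      (bLoop arr n i 0 fuel
        = decide (aLoop (fun x y => x < y) arr n
            (aLoop (fun x y => x == y) arr n i fuel) fuel = n)) ∧
      (bLoop arr n i 1 fuel
        = decide (aLoop (fun x y => x < y) arr n
            (aLoop (fun x y => x == y) arr n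
              (aLoop (fun x y => x > y) arr n i fuel) fuel) fuel = n)) := by
  intro fuel
  induction fuel with
  | zero =>
    intro i hf
    simp [bLoop, aLoop, int_beq_decide]
  | succ f ih =>
    intro i hf
    by_cases hin : i < n
    · have hne : ¬ i = n := by omega
      cases hx : PySem.List.pyGet? arr i with
      | none =>
        have ha : ∀ cmp : Int → Int → Bool, aLoop cmp arr n i (f+1) = i := by
          intro cmp; simp [aLoop, hin, hx]
        refine ⟨?_, ?_, ?_⟩ <;> simp [bLoop, if_pos hin, hx, ha, hne]
      | some x =>
        cases hy : PySem.List.pyGet? arr (i-1) with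
        | none =>
          have ha : ∀ cmp : Int → Int → Bool, aLoop cmp arr n i (f+1) = i := by
            intro cmp; simp [aLoop, hin, hx, hy]
          refine ⟨?_, ?_, ?_⟩ <;> simp [bLoop, if_pos hin, hx, hy, ha, hne]
        | some y =>
          have hstep : ∀ cmp : Int → Int → Bool, cmp x y = true →
              aLoop cmp arr n i (f+1) = aLoop cmp arr n (i+1) f := by
            intro cmp hc; simp [aLoop, if_pos hin, hx, hy, hc]
          have hhalt : ∀ cmp : Int → Int → Bool, cmp x y = false →
              aLoop cmp arr n i (f+1) = i := by
            intro cmp hc; simp [aLoop, hin, hx, hy, hc]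
          have hfu : ∀ (cmp : Int → Int → Bool) (j : Int), i + 1 ≤ j →
              aLoop cmp arr n j (f+1) = aLoop cmp arr n j f :=
            fun cmp j hj => aLoop_fuel cmp arr n (f+1) f j (by omega) (by omega)
          have hBstep : ∀ s : Int,
              bLoop arr n i s (f+1)
                = (if ((if x > y then (1:Int) else 0) - (if x < y then 1 else 0)) > s
                    then false
                    else bLoop arr n (i+1)
                      ((if x > y then (1:Int) else 0) - (if x < y then 1 else 0)) f) := by
            intro s; simp [bLoop, if_pos hin, hx, hy]
          obtain ⟨ih1, ih2, ih3⟩ := ih (i+1) (by omega)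
          rcases lt_trichotomy x y with hlt | heq | hgt
          · -- s = -1 : only the decreasing loop advances
            have hs : ((if x > y then (1:Int) else 0) - (if x < y then 1 else 0)) = -1 := by
              simp [hlt, not_lt.mpr (le_of_lt hlt)]
            have hgtf : decide (x > y) = false := by simp [not_lt.mpr (le_of_lt hlt)]
            have heqf : (x == y) = false := by simp [ne_of_lt hlt]
            have hltt : decide (x < y) = true := by simpa using hlt
            refine ⟨?_, ?_, ?_⟩
            · rw [hBstep, hs, if_neg (by norm_num), hstep _ hltt]
              exact ih1
            · rw [hBstep, hs, if_neg (by norm_num), hhalt _ heqf, hstep _ hltt]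
              exact ih1
            · rw [hBstep, hs, if_neg (by norm_num), hhalt _ hgtf, hhalt _ heqf,
                hstep _ hltt]
              exact ih1
          · -- s = 0 : equal loop advances, decreasing loop follows
            have hs : ((if x > y then (1:Int) else 0) - (if x < y then 1 else 0)) = 0 := by
              simp [heq]
            have hgtf : decide (x > y) = false := by simp [heq]
            have heqt : (x == y) = true := by simp [heq]
            have hltf : decide (x < y) = false := by simp [heq]
            refine ⟨?_, ?_, ?_⟩
            · rw [hBstep, hs, if_pos (by norm_num), hhalt _ hltf]
              simp [hne]
            · rw [hBstep, hs, if_neg (by norm_num), hstep _ heqt,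
                hfu _ (aLoop (fun x y => x == y) arr n (i+1) f)
                  (aLoop_ge _ arr n f (i+1))]
              exact ih2
            · rw [hBstep, hs, if_neg (by norm_num), hhalt _ hgtf, hstep _ heqt,
                hfu _ (aLoop (fun x y => x == y) arr n (i+1) f)
                  (aLoop_ge _ arr n f (i+1))]
              exact ih2
          · -- s = 1 : increasing loop advances, the others follow
            have hs : ((if x > y then (1:Int) else 0) - (if x < y then 1 else 0)) = 1 := by
              simp [hgt, not_lt.mpr (le_of_lt hgt)]
            have hgtt : decide (x > y) = true := by simpa using hgt
            have heqf : (x == y) = false := by simp [ne_of_gt hgt]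
            have hltf : decide (x < y) = false := by simp [not_lt.mpr (le_of_lt hgt)]
            have h1le : i + 1 ≤ aLoop (fun x y => x > y) arr n (i+1) f :=
              aLoop_ge _ arr n f (i+1)
            have h2le : i + 1 ≤ aLoop (fun x y => x == y) arr n
                (aLoop (fun x y => x > y) arr n (i+1) f) f :=
              le_trans h1le (aLoop_ge _ arr n f _)
            refine ⟨?_, ?_, ?_⟩
            · rw [hBstep, hs, if_pos (by norm_num), hhalt _ hltf]
              simp [hne]
            · rw [hBstep, hs, if_pos (by norm_num), hhalt _ heqf, hhalt _ hltf]
              simp [hne]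
            · rw [hBstep, hs, if_neg (by norm_num), hstep _ hgtt,
                hfu _ _ h1le, hfu _ _ h2le]
              exact ih3
    · have ha : ∀ cmp : Int → Int → Bool, aLoop cmp arr n i (f+1) = i :=
        fun cmp => aLoop_stop cmp arr n i _ (by omega)
      refine ⟨?_, ?_, ?_⟩ <;> simp [bLoop, if_neg hin, ha, int_beq_decide]

-- ===== VERDICT (by name: the statement is the Claim_ definition above) =====
theorem perfectArr_spec : Claim_equal_perfectArr := by
  intro arr n _ _
  unfold Spec_perfectArr perfectArr perfectArr_alt
  simp only []
  have h1le : (1:Int) ≤ aLoop (fun x y => x > y) arr n 1 (n-1).toNat :=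
    aLoop_ge _ arr n _ 1
  rw [aLoop_fuel (fun x y => x == y) arr n _ (n-1).toNat _ (le_refl _) (by omega)]
  have h2le : (1:Int) ≤ aLoop (fun x y => x == y) arr n
      (aLoop (fun x y => x > y) arr n 1 (n-1).toNat) (n-1).toNat :=
    le_trans h1le (aLoop_ge _ arr n _ _)
  rw [aLoop_fuel (fun x y => x < y) arr n _ (n-1).toNat _ (le_refl _) (by omega)]
  obtain ⟨-, -, h3⟩ := bLoop_phases arr n (n-1).toNat 1 (by omega)
  rw [h3, int_beq_decide]
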